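-- pv_equiv track=rewrite | github.com/trungkien1992/AstraTrade-Project-Phase-2 | apps/backend/services/monetization/anti_predatory_design.py | _replace_shame_language
-- ===== SOURCE A (Python) =====
-- def _replace_shame_language(text: str) -> str:
--     """Replace shame-based language with positive alternatives"""
--     shame_replacements = {
--         'premium users get': 'premium features include',
--         'unlock like others': 'unlock additional features',
--         'dont be left out': 'join premium members',
--         'basic users miss': 'premium features offer'
--     }
--
--     result = text.lower()
--     for shame, positive in shame_replacements.items():
--         result = result.replace(shame, positive)
--
--     return result
-- ===== SOURCE B (Python) =====
-- def _replace_shame_language(text: str) -> str: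
--     """Replace shame-based language with positive alternatives (single left-to-right scan)."""
--     replacements = [
--         ('premium users get', 'premium features include'),
--         ('unlock like others', 'unlock additional features'),
--         ('dont be left out', 'join premium members'),
--         ('basic users miss', 'premium features offer'),
--     ]
--     s = text.lower()
--     out = []
--     i = 0
--     n = len(s)
--     while i < n:
--         for key, positive in replacements:
--             if s.startswith(key, i):
--                 out.append(positive)
--                 i += len(key)
--                 break
--         else:
--             out.append(s[i])
--             i += 1
--     return ''.join(out)
-- ===== Notes on version B (the rewrite author's own statement) =====
-- stated objective: alternative
-- what changed: B replaces A's four sequential full-string .replace passes by one left-to-right scan that tries the four phrases in table order at each position, emitting the replacement and skipping the phrase on a match; correctness rests on the phrases never overlapping and the replacement texts never starting a phrase.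
import Mathlib
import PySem

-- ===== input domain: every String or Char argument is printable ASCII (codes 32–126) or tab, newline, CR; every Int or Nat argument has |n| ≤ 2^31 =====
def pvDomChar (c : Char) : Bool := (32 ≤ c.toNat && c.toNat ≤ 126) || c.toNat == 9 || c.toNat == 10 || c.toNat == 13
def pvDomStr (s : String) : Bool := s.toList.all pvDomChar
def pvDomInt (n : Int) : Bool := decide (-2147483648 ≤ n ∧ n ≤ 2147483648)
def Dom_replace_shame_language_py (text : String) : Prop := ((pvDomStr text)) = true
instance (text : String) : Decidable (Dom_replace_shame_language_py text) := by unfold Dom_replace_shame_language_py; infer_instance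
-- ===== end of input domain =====

-- B replaces A's four sequential full-string replace passes with a single left-to-right
-- scan consulting the phrase table at each position (alternative decomposition, same cost).


-- ===== PORT A =====
-- result = text.lower(); then four sequential str.replace passes, in dict order.
def replace_shame_language_py (text : String) : String :=
  let result := PySem.Str.lower text
  let result := PySem.Str.replace result "premium users get" "premium features include"
  let result := PySem.Str.replace result "unlock like others" "unlock additional features"
  let result := PySem.Str.replace result "dont be left out" "join premium members"
  let result := PySem.Str.replace result "basic users miss" "premium features offer"
  result

-- ===== PORT B =====
-- Source B's while loop over the lowered characters: at each position try the four keys in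
-- table order; on a match append the replacement and advance i by len(key), else copy one
-- character.  The index i becomes consuming the list from the front; 'i += len(key)'
-- is dropping the matched key, i.e. dropping (len key - 1) of the tail.
def pvScan : List Char → List Char
  | [] => []
  | c :: t =>
    if ("premium users get".toList).isPrefixOf (c :: t) then
      "premium features include".toList ++ pvScan (t.drop 16)
    else if ("unlock like others".toList).isPrefixOf (c :: t) then
      "unlock additional features".toList ++ pvScan (t.drop 17)
    else if ("dont be left out".toList).isPrefixOf (c :: t) then
      "join premium members".toList ++ pvScan (t.drop 15)
    else if ("basic users miss".toList).isPrefixOf (c :: t) then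
      "premium features offer".toList ++ pvScan (t.drop 15)
    else
      c :: pvScan t
termination_by l => l.length
decreasing_by all_goals simp [List.length_drop]

def replace_shame_language_py_alt (text : String) : String :=
  String.ofList (pvScan (PySem.Str.lower text).toList)

-- ===== PRECONDITION & SPEC =====
def Spec_replace_shame_language_py (text : String) (out : String) : Prop := out = replace_shame_language_py_alt text
instance (text : String) (out : String) : Decidable (Spec_replace_shame_language_py text out) := by unfold Spec_replace_shame_language_py; infer_instance

-- ===== CLAIM (what is proved, stated in full; the proofs are below) =====
def Claim_equal_replace_shame_language_py : Prop := ∀ (text : String), Dom_replace_shame_language_py text → Spec_replace_shame_language_py text (replace_shame_language_py text)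

-- ===== LEMMAS AND PROOFS =====

-- A clean recursion computing Python's str.replace (for a nonempty pattern).
def pvRepl (old new : List Char) : List Char → List Char
  | [] => []
  | c :: t =>
    if old.isPrefixOf (c :: t) then new ++ pvRepl old new (t.drop (old.length - 1))
    else c :: pvRepl old new t
termination_by l => l.length
decreasing_by all_goals simp [List.length_drop]

theorem pvRepl_nil (old new : List Char) : pvRepl old new [] = [] := by
  simp [pvRepl]

theorem pvRepl_cons_pos (old new : List Char) (c : Char) (t : List Char)
    (h : old <+: c :: t) :
    pvRepl old new (c :: t) = new ++ pvRepl old new (t.drop (old.length - 1)) := by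
  rw [pvRepl, if_pos (List.isPrefixOf_iff_prefix.mpr h)]

theorem pvRepl_cons_neg (old new : List Char) (c : Char) (t : List Char)
    (h : ¬ old <+: c :: t) :
    pvRepl old new (c :: t) = c :: pvRepl old new t := by
  rw [pvRepl, if_neg (fun hb => h (List.isPrefixOf_iff_prefix.mp hb))]

-- PySem's replace.go (with enough fuel) is pvRepl.
theorem pvGo_eq (old new : List Char) (hold : old ≠ []) :
    ∀ (fuel : Nat) (l acc : List Char), l.length ≤ fuel →
      PySem.Chars.replace.go old new fuel l acc = acc.reverse ++ pvRepl old new l := by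
  intro fuel
  induction fuel with
  | zero =>
    intro l acc hl
    have : l = [] := List.eq_nil_of_length_eq_zero (Nat.le_zero.mp hl)
    subst this
    simp [PySem.Chars.replace.go, pvRepl_nil]
  | succ n ih =>
    intro l acc hl
    cases l with
    | nil => simp [PySem.Chars.replace.go, pvRepl_nil]
    | cons c t =>
      rw [PySem.Chars.replace.go]
      by_cases h : old.isPrefixOf (c :: t)
      · rw [if_pos h]
        have hp : old <+: c :: t := List.isPrefixOf_iff_prefix.mp h
        obtain ⟨m, hm⟩ : ∃ m, old.length = m + 1 := by
          cases old with
          | nil => exact absurd rfl hold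
          | cons _ _ => exact ⟨_, rfl⟩
        have hdrop : List.drop old.length (c :: t) = t.drop (old.length - 1) := by
          rw [hm]; simp
        have hlen : (List.drop old.length (c :: t)).length ≤ n := by
          simp only [List.length_drop, List.length_cons] at *
          omega
        rw [ih _ _ hlen, hdrop, pvRepl_cons_pos old new c t hp]
        simp
      · rw [if_neg h]
        have hlen : t.length ≤ n := by simp at hl; omega
        rw [ih _ _ hlen, pvRepl_cons_neg old new c t
          (fun hp => h (List.isPrefixOf_iff_prefix.mpr hp))]
        simp

theorem pvReplace_eq (old new l : List Char) (hold : old ≠ []) :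
    PySem.Chars.replace l old new = pvRepl old new l := by
  unfold PySem.Chars.replace
  rw [if_neg (by simpa [List.isEmpty_iff] using hold)]
  simpa using pvGo_eq old new hold l.length l [] le_rfl

-- A prefix of a concatenation is comparable with the left part.
theorem pvPrefix_split {k a t : List Char} (h : k <+: a ++ t) : k <+: a ∨ a <+: k := by
  by_cases hle : k.length ≤ a.length
  · exact Or.inl (List.prefix_of_prefix_length_le h (List.prefix_append a t) hle)
  · exact Or.inr (List.prefix_of_prefix_length_le (List.prefix_append a t) h (Nat.le_of_not_le hle))

-- Pass-through: if no position of s can start a k-match (whatever follows),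
-- replace walks over s untouched.
theorem pvPass (k r s : List Char)
    (hC : ∀ p, p < s.length → ¬ k <+: s.drop p ∧ ¬ s.drop p <+: k) :
    ∀ t, pvRepl k r (s ++ t) = s ++ pvRepl k r t := by
  induction s with
  | nil => intro t; simp
  | cons c s' ih =>
    intro t
    have h0 := hC 0 (by simp)
    simp only [List.drop_zero] at h0
    have hnk : ¬ k <+: c :: (s' ++ t) := by
      intro h
      rcases pvPrefix_split (a := c :: s') (t := t) (by simpa using h) with h1 | h1
      · exact h0.1 h1
      · exact h0.2 h1
    rw [List.cons_append, pvRepl_cons_neg _ _ _ _ hnk,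
      ih (fun p hp => by simpa using hC (p + 1) (by simpa using Nat.succ_lt_succ hp))]
    rfl

-- Head match: replace rewrites a leading occurrence of old.
theorem pvRepl_head (old new x : List Char) (hold : old ≠ []) :
    pvRepl old new (old ++ x) = new ++ pvRepl old new x := by
  cases old with
  | nil => exact absurd rfl hold
  | cons c k' =>
    rw [List.cons_append, pvRepl_cons_pos _ _ _ _ (by rw [← List.cons_append]; exact List.prefix_append _ _)]
    simp

-- No new occurrence: if no suffix of k can touch r', then a k-prefix of the replaced
-- list was already a k-prefix of the original list.
theorem pvNoNew (k k' r' : List Char)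
    (hE : ∀ j, j < k.length → ¬ k.drop j <+: r' ∧ ¬ r' <+: k.drop j) :
    ∀ (l : List Char) (j : Nat), j < k.length → k.drop j <+: pvRepl k' r' l → k.drop j <+: l := by
  intro l
  induction l with
  | nil =>
    intro j hj h
    rw [pvRepl_nil] at h
    have : k.drop j = [] := List.prefix_nil.mp h
    have : k.length ≤ j := by
      have := congrArg List.length this
      simp at this
      omega
    omega
  | cons c t ih =>
    intro j hj h
    by_cases hp : k' <+: c :: t
    · rw [pvRepl_cons_pos _ _ _ _ hp] at h
      rcases pvPrefix_split h with h1 | h1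
      · exact absurd h1 (hE j hj).1
      · exact absurd h1 (hE j hj).2
    · rw [pvRepl_cons_neg _ _ _ _ hp] at h
      rw [List.drop_eq_getElem_cons hj] at h ⊢
      rw [List.cons_prefix_cons] at h ⊢
      refine ⟨h.1, ?_⟩
      by_cases hj1 : j + 1 < k.length
      · exact ih (j + 1) hj1 h.2
      · rw [List.drop_eq_nil_of_le (by omega)]
        exact List.nil_prefix

theorem pvNoNew0 (k k' r' : List Char)
    (hE : ∀ j, j < k.length → ¬ k.drop j <+: r' ∧ ¬ r' <+: k.drop j)
    (hk : k ≠ []) (l : List Char) (h : ¬ k <+: l) : ¬ k <+: pvRepl k' r' l := by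
  intro hc
  have hlen : 0 < k.length := List.length_pos_iff.mpr hk
  have := pvNoNew k k' r' hE l 0 hlen (by simpa using hc)
  simp at this
  exact h this

-- One-step equations for pvScan, guarded by the branch conditions.
theorem pvScan_pos1 (c : Char) (t : List Char)
    (h1 : "premium users get".toList <+: c :: t) :
    pvScan (c :: t) = "premium features include".toList ++ pvScan (t.drop 16) := by
  rw [pvScan, if_pos (List.isPrefixOf_iff_prefix.mpr h1)]

theorem pvScan_pos2 (c : Char) (t : List Char)
    (h1 : ¬ "premium users get".toList <+: c :: t)
    (h2 : "unlock like others".toList <+: c :: t) :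
    pvScan (c :: t) = "unlock additional features".toList ++ pvScan (t.drop 17) := by
  rw [pvScan, if_neg (fun hb => h1 (List.isPrefixOf_iff_prefix.mp hb)),
    if_pos (List.isPrefixOf_iff_prefix.mpr h2)]

theorem pvScan_pos3 (c : Char) (t : List Char)
    (h1 : ¬ "premium users get".toList <+: c :: t)
    (h2 : ¬ "unlock like others".toList <+: c :: t)
    (h3 : "dont be left out".toList <+: c :: t) :
    pvScan (c :: t) = "join premium members".toList ++ pvScan (t.drop 15) := by
  rw [pvScan, if_neg (fun hb => h1 (List.isPrefixOf_iff_prefix.mp hb)),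
    if_neg (fun hb => h2 (List.isPrefixOf_iff_prefix.mp hb)),
    if_pos (List.isPrefixOf_iff_prefix.mpr h3)]

theorem pvScan_pos4 (c : Char) (t : List Char)
    (h1 : ¬ "premium users get".toList <+: c :: t)
    (h2 : ¬ "unlock like others".toList <+: c :: t)
    (h3 : ¬ "dont be left out".toList <+: c :: t)
    (h4 : "basic users miss".toList <+: c :: t) :
    pvScan (c :: t) = "premium features offer".toList ++ pvScan (t.drop 15) := by
  rw [pvScan, if_neg (fun hb => h1 (List.isPrefixOf_iff_prefix.mp hb)),
    if_neg (fun hb => h2 (List.isPrefixOf_iff_prefix.mp hb)),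
    if_neg (fun hb => h3 (List.isPrefixOf_iff_prefix.mp hb)),
    if_pos (List.isPrefixOf_iff_prefix.mpr h4)]

theorem pvScan_neg (c : Char) (t : List Char)
    (h1 : ¬ "premium users get".toList <+: c :: t)
    (h2 : ¬ "unlock like others".toList <+: c :: t)
    (h3 : ¬ "dont be left out".toList <+: c :: t)
    (h4 : ¬ "basic users miss".toList <+: c :: t) :
    pvScan (c :: t) = c :: pvScan t := by
  rw [pvScan, if_neg (fun hb => h1 (List.isPrefixOf_iff_prefix.mp hb)),
    if_neg (fun hb => h2 (List.isPrefixOf_iff_prefix.mp hb)),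
    if_neg (fun hb => h3 (List.isPrefixOf_iff_prefix.mp hb)),
    if_neg (fun hb => h4 (List.isPrefixOf_iff_prefix.mp hb))]

-- The heart: the four sequential replaces equal the single scan, on every character list.
theorem pvMain (l : List Char) :
    pvRepl "basic users miss".toList "premium features offer".toList
      (pvRepl "dont be left out".toList "join premium members".toList
        (pvRepl "unlock like others".toList "unlock additional features".toList
          (pvRepl "premium users get".toList "premium features include".toList l)))
      = pvScan l := by
  suffices H : ∀ (n : Nat) (l : List Char), l.length ≤ n →
      pvRepl "basic users miss".toList "premium features offer".toList
        (pvRepl "dont be left out".toList "join premium members".toList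
          (pvRepl "unlock like others".toList "unlock additional features".toList
            (pvRepl "premium users get".toList "premium features include".toList l)))
        = pvScan l from H l.length l le_rfl
  intro n
  induction n with
  | zero =>
    intro l hl
    have : l = [] := List.eq_nil_of_length_eq_zero (Nat.le_zero.mp hl)
    subst this
    simp [pvRepl_nil, pvScan]
  | succ n ih =>
    intro l hl
    cases l with
    | nil => simp [pvRepl_nil, pvScan]
    | cons c t =>
      by_cases h1 : "premium users get".toList <+: c :: t
      · obtain ⟨x, hx⟩ := h1
        have hx' : c :: t = "premium users get".toList ++ x := hx.symm
        have hdx : t.drop 16 = x := by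
          have : (c :: t).drop 17 = x := by
            rw [hx', List.drop_left' (by decide)]
          simpa using this
        have hlx : x.length ≤ n := by
          have e := congrArg List.length hx'
          rw [List.length_append] at e
          simp only [List.length_cons,
            show ("premium users get".toList).length = 17 from by decide] at e
          simp only [List.length_cons] at hl
          omega
        rw [pvScan_pos1 c t ⟨x, hx⟩, hdx, hx',
          pvRepl_head _ _ _ (by decide),
          pvPass _ _ _ (by decide),
          pvPass _ _ _ (by decide),
          pvPass _ _ _ (by decide),
          ih x hlx]
      · by_cases h2 : "unlock like others".toList <+: c :: t
        · obtain ⟨x, hx⟩ := h2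
          have hx' : c :: t = "unlock like others".toList ++ x := hx.symm
          have hdx : t.drop 17 = x := by
            have : (c :: t).drop 18 = x := by
              rw [hx', List.drop_left' (by decide)]
            simpa using this
          have hlx : x.length ≤ n := by
            have e := congrArg List.length hx'
            rw [List.length_append] at e
            simp only [List.length_cons,
              show ("unlock like others".toList).length = 18 from by decide] at e
            simp only [List.length_cons] at hl
            omega
          rw [pvScan_pos2 c t h1 ⟨x, hx⟩, hdx, hx',
            pvPass _ _ _ (by decide),
            pvRepl_head _ _ _ (by decide),
            pvPass _ _ _ (by decide),
            pvPass _ _ _ (by decide),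
            ih x hlx]
        · by_cases h3 : "dont be left out".toList <+: c :: t
          · obtain ⟨x, hx⟩ := h3
            have hx' : c :: t = "dont be left out".toList ++ x := hx.symm
            have hdx : t.drop 15 = x := by
              have : (c :: t).drop 16 = x := by
                rw [hx', List.drop_left' (by decide)]
              simpa using this
            have hlx : x.length ≤ n := by
              have e := congrArg List.length hx'
              rw [List.length_append] at e
              simp only [List.length_cons,
                show ("dont be left out".toList).length = 16 from by decide] at e
              simp only [List.length_cons] at hl
              omega
            rw [pvScan_pos3 c t h1 h2 ⟨x, hx⟩, hdx, hx',
              pvPass _ _ _ (by decide),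
              pvPass _ _ _ (by decide),
              pvRepl_head _ _ _ (by decide),
              pvPass _ _ _ (by decide),
              ih x hlx]
          · by_cases h4 : "basic users miss".toList <+: c :: t
            · obtain ⟨x, hx⟩ := h4
              have hx' : c :: t = "basic users miss".toList ++ x := hx.symm
              have hdx : t.drop 15 = x := by
                have : (c :: t).drop 16 = x := by
                  rw [hx', List.drop_left' (by decide)]
                simpa using this
              have hlx : x.length ≤ n := by
                have e := congrArg List.length hx'
                rw [List.length_append] at e
                simp only [List.length_cons,
                  show ("basic users miss".toList).length = 16 from by decide] at e
                simp only [List.length_cons] at hl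
                omega
              rw [pvScan_pos4 c t h1 h2 h3 ⟨x, hx⟩, hdx, hx',
                pvPass _ _ _ (by decide),
                pvPass _ _ _ (by decide),
                pvPass _ _ _ (by decide),
                pvRepl_head _ _ _ (by decide),
                ih x hlx]
            · have hlt : t.length ≤ n := by simp at hl; omega
              have e1 := pvRepl_cons_neg "premium users get".toList
                "premium features include".toList c t h1
              have n2 : ¬ "unlock like others".toList <+:
                  c :: pvRepl "premium users get".toList "premium features include".toList t := by
                have := pvNoNew0 "unlock like others".toList "premium users get".toList "premium features include".toList (by decide) (by decide) (c :: t) h2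
                rwa [e1] at this
              have e2 := pvRepl_cons_neg "unlock like others".toList
                "unlock additional features".toList _ _ n2
              have n3 : ¬ "dont be left out".toList <+:
                  c :: pvRepl "unlock like others".toList "unlock additional features".toList
                    (pvRepl "premium users get".toList "premium features include".toList t) := by
                have s1 := pvNoNew0 "dont be left out".toList "premium users get".toList "premium features include".toList (by decide) (by decide) (c :: t) h3
                have s2 := pvNoNew0 "dont be left out".toList "unlock like others".toList "unlock additional features".toList (by decide) (by decide) _ s1
                rwa [e1, e2] at s2
              have e3 := pvRepl_cons_neg "dont be left out".toList
                "join premium members".toList _ _ n3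
              have n4 : ¬ "basic users miss".toList <+:
                  c :: pvRepl "dont be left out".toList "join premium members".toList
                    (pvRepl "unlock like others".toList "unlock additional features".toList
                      (pvRepl "premium users get".toList "premium features include".toList t)) := by
                have s1 := pvNoNew0 "basic users miss".toList "premium users get".toList "premium features include".toList (by decide) (by decide) (c :: t) h4
                have s2 := pvNoNew0 "basic users miss".toList "unlock like others".toList "unlock additional features".toList (by decide) (by decide) _ s1
                have s3 := pvNoNew0 "basic users miss".toList "dont be left out".toList "join premium members".toList (by decide) (by decide) _ s2
                rwa [e1, e2, e3] at s3
              have e4 := pvRepl_cons_neg "basic users miss".toList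
                "premium features offer".toList _ _ n4
              rw [e1, e2, e3, e4, pvScan_neg c t h1 h2 h3 h4, ih t hlt]

-- ===== VERDICT (by name: the statement is the Claim_ definition above) =====
theorem replace_shame_language_py_spec : Claim_equal_replace_shame_language_py := by
  intro text _
  unfold Spec_replace_shame_language_py replace_shame_language_py replace_shame_language_py_alt
  apply String.toList_inj.mp
  simp only [PySem.Str.toList_replace]
  rw [pvReplace_eq "premium users get".toList "premium features include".toList _ (by decide), pvReplace_eq "unlock like others".toList "unlock additional features".toList _ (by decide),
    pvReplace_eq "dont be left out".toList "join premium members".toList _ (by decide), pvReplace_eq "basic users miss".toList "premium features offer".toList _ (by decide)]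
  simp only [String.toList_ofList]
  exact pvMain _
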